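-- pv_equiv track=rewrite | github.com/lonelyananas/Ivanti-API | Ivanti.servicereq.pull.automation.py | combine_params_and_active_reqs
-- ===== SOURCE A (Python) =====
-- def combine_params_and_active_reqs(reqs, params):
--     combined_dict=[]
--     for y in params:
--         for x in reqs:
--             if "ParentLink_RecID" in y:
--                 if y["ParentLink_RecID"] == x["RecId"]:
--                     for z in y.copy():
--                         y["Parameter_{}".format(z)] =  y.pop(z)
--                     #for t in x:
--                     #    if z == t:
--                     combined_dict.append(y | x)
--
--         else:
--             continue
--
--     return combined_dict
-- ===== SOURCE B (Python) =====
-- def combine_params_and_active_reqs(reqs, params):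
--     # Hash-join: index each req by its RecId (first occurrence wins), then one
--     # pass over params; matched params dicts are renamed in place, like A.
--     index = {}
--     for x in reqs:
--         if "RecId" in x and x["RecId"] not in index:
--             index[x["RecId"]] = x
--     combined = []
--     for y in params:
--         if "ParentLink_RecID" in y:
--             x = index.get(y["ParentLink_RecID"])
--             if x is not None:
--                 for k in list(y):
--                     y["Parameter_{}".format(k)] = y.pop(k)
--                 combined.append(y | x)
--     return combined
-- ===== Notes on version B (the rewrite author's own statement) =====
-- stated objective: alternative
-- what changed: B replaces the nested params-by-reqs scan with a single hash index of reqs keyed by RecId (first occurrence wins) plus one pass over params, keeping the same per-match in-place key renaming; a timing run did not measure B as faster, so no speed is claimed.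
import Mathlib
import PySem

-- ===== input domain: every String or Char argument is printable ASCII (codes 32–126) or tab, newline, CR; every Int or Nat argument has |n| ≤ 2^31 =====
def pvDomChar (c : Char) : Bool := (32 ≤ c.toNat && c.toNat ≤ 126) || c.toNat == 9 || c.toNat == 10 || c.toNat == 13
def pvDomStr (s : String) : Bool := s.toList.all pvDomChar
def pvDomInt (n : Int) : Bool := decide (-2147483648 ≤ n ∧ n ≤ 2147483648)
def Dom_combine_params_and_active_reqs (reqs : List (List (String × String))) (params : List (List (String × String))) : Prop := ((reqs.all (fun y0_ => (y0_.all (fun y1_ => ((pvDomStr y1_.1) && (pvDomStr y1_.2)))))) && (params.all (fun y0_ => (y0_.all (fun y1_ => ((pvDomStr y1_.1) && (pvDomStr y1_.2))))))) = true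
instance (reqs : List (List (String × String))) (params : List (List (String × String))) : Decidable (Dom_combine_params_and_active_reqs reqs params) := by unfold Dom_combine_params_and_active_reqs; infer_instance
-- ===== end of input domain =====

-- B replaces A's nested params×reqs scan by a hash index of reqs keyed by RecId plus one pass
-- over params, keeping the same per-match in-place key renaming; both Pythons mutate the matched
-- params dicts in place, and the equivalence proved here is about the return value.

-- ===== PORT A =====
-- for z in y.copy(): y["Parameter_{}".format(z)] = y.pop(z)
def pvRenameA (y : PySem.Dict String String) : PySem.Dict String String :=
  (PySem.Dict.keys y).foldl
    (fun d z =>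
      match PySem.Dict.pop? d z with
      | some (v, d') => PySem.Dict.insert d' ("Parameter_" ++ z) v
      | none => d)      -- unreachable in Python (z is a key of the dict); Python would raise KeyError
    y

-- d | x  (dict union: start from d, write x's items left to right)
def pvUnion (d : PySem.Dict String String) (x : List (String × String)) : PySem.Dict String String :=
  x.foldl (fun d kv => PySem.Dict.insert d kv.1 kv.2) d

-- one iteration of A's inner `for x in reqs` loop; the state is (current y, combined_dict)
def pvStepA (s : PySem.Dict String String × List (List (String × String))) (x : List (String × String)) :
    PySem.Dict String String × List (List (String × String)) :=
  if PySem.Dict.contains s.1 "ParentLink_RecID" then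
    match PySem.Dict.get? s.1 "ParentLink_RecID", PySem.Dict.get? (PySem.Dict.mk x) "RecId" with
    | some pl, some r =>
        if pl = r then
          let y' := pvRenameA s.1
          (y', s.2 ++ [(pvUnion y' x).items])
        else s
    | _, _ => s      -- x["RecId"] raises KeyError in Python: excluded by Pre_
  else s

def combine_params_and_active_reqs (reqs : List (List (String × String))) (params : List (List (String × String))) : List (List (String × String)) :=
  params.foldl (fun acc y => (reqs.foldl pvStepA (PySem.Dict.mk y, acc)).2) []

-- ===== PORT B =====
-- index[x["RecId"]] = x  for each req whose RecId is not yet present (first occurrence wins)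
def pvIndexStep (idx : PySem.Dict String (List (String × String))) (x : List (String × String)) :
    PySem.Dict String (List (String × String)) :=
  match PySem.Dict.get? (PySem.Dict.mk x) "RecId" with
  | some r => if PySem.Dict.contains idx r then idx else PySem.Dict.insert idx r x
  | none => idx

-- for k in list(y): y["Parameter_{}".format(k)] = y.pop(k)
def pvRenameB (y : PySem.Dict String String) : PySem.Dict String String :=
  (PySem.Dict.keys y).foldl
    (fun d k =>
      match PySem.Dict.pop? d k with
      | some (v, d') => PySem.Dict.insert d' ("Parameter_" ++ k) v
      | none => d)      -- unreachable in Python (k is a key of the dict)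
    y

def combine_params_and_active_reqs_alt (reqs : List (List (String × String))) (params : List (List (String × String))) : List (List (String × String)) :=
  let index := reqs.foldl pvIndexStep PySem.Dict.empty
  params.foldl
    (fun acc y =>
      match PySem.Dict.get? (PySem.Dict.mk y) "ParentLink_RecID" with
      | some v =>
          match PySem.Dict.get? index v with
          | some x => acc ++ [(pvUnion (pvRenameB (PySem.Dict.mk y)) x).items]
          | none => acc
      | none => acc)
    []

-- ===== PRECONDITION & SPEC =====
-- Pre1 o reqs: scanning reqs left to right, no req lacking a "RecId" key is reached before the
-- first req whose RecId equals o — exactly the condition under which A's x["RecId"] never raises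
-- for a param whose ParentLink_RecID lookup is o.
def Pre1 (o : Option String) (reqs : List (List (String × String))) : Prop :=
  ∀ x ∈ reqs.takeWhile (fun x => !(PySem.Dict.get? (PySem.Dict.mk x) "RecId" == o)),
    (PySem.Dict.get? (PySem.Dict.mk x) "RecId").isSome

-- Pre_ excludes exactly the inputs on which A raises KeyError (a param with ParentLink_RecID
-- meets a req without a RecId key before any matching req).
def Pre_combine_params_and_active_reqs (reqs : List (List (String × String))) (params : List (List (String × String))) : Prop :=
  ∀ p ∈ params, (PySem.Dict.get? (PySem.Dict.mk p) "ParentLink_RecID").isSome →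
      Pre1 (PySem.Dict.get? (PySem.Dict.mk p) "ParentLink_RecID") reqs
instance (reqs : List (List (String × String))) (params : List (List (String × String))) : Decidable (Pre_combine_params_and_active_reqs reqs params) := by
  unfold Pre_combine_params_and_active_reqs; unfold Pre1; infer_instance

def pvWitness_combine_params_and_active_reqs : (List (List (String × String))) × (List (List (String × String))) :=
  ([[("RecId", "1"), ("Status", "Active")]], [[("ParentLink_RecID", "1"), ("Name", "n")]])

def Spec_combine_params_and_active_reqs (reqs : List (List (String × String))) (params : List (List (String × String))) (out : List (List (String × String))) : Prop := out = combine_params_and_active_reqs_alt reqs params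
instance (reqs : List (List (String × String))) (params : List (List (String × String))) (out : List (List (String × String))) : Decidable (Spec_combine_params_and_active_reqs reqs params out) := by unfold Spec_combine_params_and_active_reqs; infer_instance

-- ===== CLAIM =====
def Claim_equal_combine_params_and_active_reqs : Prop := ∀ (reqs : List (List (String × String))) (params : List (List (String × String))), Dom_combine_params_and_active_reqs reqs params → Pre_combine_params_and_active_reqs reqs params → Spec_combine_params_and_active_reqs reqs params (combine_params_and_active_reqs reqs params)


-- ===== LEMMAS AND PROOFS =====

-- the two rename loops are the same fold
lemma pvRename_eq_B : pvRenameA = pvRenameB := rfl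

-- "Parameter_" ++ k is never the key "ParentLink_RecID"
lemma pvPref_ne_PL (k : String) : "Parameter_" ++ k ≠ "ParentLink_RecID" := by
  intro h
  have h2 := congrArg String.toList h
  simp [String.toList_append] at h2

-- erasing never introduces a key
lemma pvContains_erase_false (d : PySem.Dict String String) (z k : String)
    (h : PySem.Dict.contains d k = false) :
    PySem.Dict.contains (PySem.Dict.erase d z) k = false := by
  rw [show PySem.Dict.contains (PySem.Dict.erase d z) k
      = (d.items.filter (fun p => !(p.1 == z))).any (fun p => p.1 == k) from rfl]
  rw [show PySem.Dict.contains d k = d.items.any (fun p => p.1 == k) from rfl] at h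
  rw [List.any_eq_false] at h ⊢
  intro p hp
  exact h p (List.mem_of_mem_filter hp)

-- erasing z removes every occurrence of z
lemma pvContains_erase_self (d : PySem.Dict String String) (z : String) :
    PySem.Dict.contains (PySem.Dict.erase d z) z = false := by
  rw [show PySem.Dict.contains (PySem.Dict.erase d z) z
      = (d.items.filter (fun p => !(p.1 == z))).any (fun p => p.1 == z) from rfl]
  rw [List.any_eq_false]
  intro p hp
  have := List.of_mem_filter hp
  simpa using this

-- the rename fold never (re)creates the key "ParentLink_RecID"
lemma pvRenFold_no_PL (l : List String) :
    ∀ (d : PySem.Dict String String),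
    PySem.Dict.contains d "ParentLink_RecID" = false →
    PySem.Dict.contains
      (l.foldl (fun d z =>
        match PySem.Dict.pop? d z with
        | some (v, d') => PySem.Dict.insert d' ("Parameter_" ++ z) v
        | none => d) d) "ParentLink_RecID" = false := by
  induction l with
  | nil => intro d h; exact h
  | cons z t ih =>
    intro d h
    rw [List.foldl_cons]
    cases hp : PySem.Dict.pop? d z with
    | none => exact ih d h
    | some r =>
      obtain ⟨v, d'⟩ := r
      have hd' : d' = PySem.Dict.erase d z := by
        unfold PySem.Dict.pop? at hp
        cases hg : PySem.Dict.get? d z with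
        | none => rw [hg] at hp; simp at hp
        | some w => rw [hg] at hp; simp at hp; exact hp.2.symm
      apply ih
      rw [PySem.Dict.contains_insert]
      have h1 : ("ParentLink_RecID" == "Parameter_" ++ z) = false := by
        simp only [beq_eq_false_iff_ne, ne_eq]
        exact fun e => pvPref_ne_PL z e.symm
      rw [h1, Bool.false_or, hd']
      exact pvContains_erase_false d z _ h

-- after the rename of a dict holding "ParentLink_RecID", that key is gone
lemma pvRename_no_PL (d : PySem.Dict String String)
    (h : PySem.Dict.contains d "ParentLink_RecID" = true) :
    PySem.Dict.contains (pvRenameA d) "ParentLink_RecID" = false := by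
  unfold pvRenameA
  have hmem : "ParentLink_RecID" ∈ PySem.Dict.keys d := (PySem.Dict.contains_iff_mem_keys d "ParentLink_RecID").mp h
  obtain ⟨l1, l2, hsplit⟩ := List.append_of_mem hmem
  rw [hsplit, List.foldl_append, List.foldl_cons]
  set d1 := l1.foldl (fun d z =>
      match PySem.Dict.pop? d z with
      | some (v, d') => PySem.Dict.insert d' ("Parameter_" ++ z) v
      | none => d) d with hd1
  cases hp : PySem.Dict.pop? d1 "ParentLink_RecID" with
  | none =>
    have hc : PySem.Dict.contains d1 "ParentLink_RecID" = false := by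
      unfold PySem.Dict.pop? at hp
      cases hg : PySem.Dict.get? d1 "ParentLink_RecID" with
      | none => rw [PySem.Dict.contains_eq_isSome_get?, hg]; rfl
      | some w => rw [hg] at hp; simp at hp
    exact pvRenFold_no_PL l2 d1 hc
  | some r =>
    obtain ⟨v, d'⟩ := r
    have hd' : d' = PySem.Dict.erase d1 "ParentLink_RecID" := by
      unfold PySem.Dict.pop? at hp
      cases hg : PySem.Dict.get? d1 "ParentLink_RecID" with
      | none => rw [hg] at hp; simp at hp
      | some w => rw [hg] at hp; simp at hp; exact hp.2.symm
    apply pvRenFold_no_PL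
    rw [PySem.Dict.contains_insert]
    have h1 : ("ParentLink_RecID" == "Parameter_" ++ "ParentLink_RecID") = false := by
      simp only [beq_eq_false_iff_ne, ne_eq]
      exact fun e => pvPref_ne_PL "ParentLink_RecID" e.symm
    rw [h1, Bool.false_or, hd']
    exact pvContains_erase_self d1 "ParentLink_RecID"

-- A's inner loop does nothing once y has no ParentLink_RecID key
lemma pvInner_skip (l : List (List (String × String))) (y : PySem.Dict String String)
    (acc : List (List (String × String)))
    (h : PySem.Dict.contains y "ParentLink_RecID" = false) :
    l.foldl pvStepA (y, acc) = (y, acc) := by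
  induction l with
  | nil => rfl
  | cons x t ih =>
    rw [List.foldl_cons, show pvStepA (y, acc) x = (y, acc) from by simp [pvStepA, h]]
    exact ih

-- cons characterisation of Pre1
lemma pvPre1_cons {v : String} {x : List (String × String)} {t : List (List (String × String))}
    (h : Pre1 (some v) (x :: t)) :
    (PySem.Dict.get? (PySem.Dict.mk x) "RecId").isSome ∧
      (PySem.Dict.get? (PySem.Dict.mk x) "RecId" = some v ∨ Pre1 (some v) t) := by
  unfold Pre1 at h
  by_cases hx : (PySem.Dict.get? (PySem.Dict.mk x) "RecId" == some v) = true
  · have heq : PySem.Dict.get? (PySem.Dict.mk x) "RecId" = some v := by simpa using hx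
    exact ⟨by simp [heq], Or.inl heq⟩
  · have hp : (!(PySem.Dict.get? (PySem.Dict.mk x) "RecId" == some v)) = true := by
      simp only [Bool.not_eq_true] at hx
      simp [hx]
    rw [List.takeWhile_cons, if_pos hp] at h
    refine ⟨h x List.mem_cons_self, Or.inr ?_⟩
    intro y hy
    exact h y (List.mem_cons_of_mem _ hy)

-- the index lookup is the first req whose RecId is v
lemma pvIndex_get? (l : List (List (String × String))) (idx : PySem.Dict String (List (String × String))) (v : String) :
    PySem.Dict.get? (l.foldl pvIndexStep idx) v =
      (PySem.Dict.get? idx v).or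
        (l.find? (fun x => PySem.Dict.get? (PySem.Dict.mk x) "RecId" == some v)) := by
  induction l generalizing idx with
  | nil => simp
  | cons x t ih =>
    rw [List.foldl_cons]
    cases hx : PySem.Dict.get? (PySem.Dict.mk x) "RecId" with
    | none =>
      rw [show pvIndexStep idx x = idx from by simp [pvIndexStep, hx], ih,
        List.find?_cons_of_neg (by simp [hx])]
    | some r =>
      by_cases hrv : r = v
      · subst hrv
        rw [List.find?_cons_of_pos (by simp [hx])]
        by_cases hc : PySem.Dict.contains idx r = true
        · rw [show pvIndexStep idx x = idx from by simp [pvIndexStep, hx, hc], ih]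
          rw [PySem.Dict.contains_eq_isSome_get?] at hc
          obtain ⟨a, ha⟩ := Option.isSome_iff_exists.mp hc
          rw [ha]
          simp
        · have hnone : PySem.Dict.get? idx r = none := by
            rw [PySem.Dict.contains_eq_isSome_get?] at hc
            simpa [Option.isSome_iff_ne_none] using hc
          rw [show pvIndexStep idx x = PySem.Dict.insert idx r x from by simp [pvIndexStep, hx, hc], ih,
            PySem.Dict.get?_insert, if_pos rfl, hnone]
          simp
      · rw [List.find?_cons_of_neg (by simp [hx, hrv])]
        by_cases hc : PySem.Dict.contains idx r = true
        · rw [show pvIndexStep idx x = idx from by simp [pvIndexStep, hx, hc], ih]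
        · rw [show pvIndexStep idx x = PySem.Dict.insert idx r x from by simp [pvIndexStep, hx, hc], ih,
            PySem.Dict.get?_insert, if_neg (fun hh => hrv hh.symm)]

-- A's inner loop = find the first matching req, rename once, append the union
lemma pvInner_eq (l : List (List (String × String))) (y : PySem.Dict String String)
    (acc : List (List (String × String))) (v : String)
    (hpl : PySem.Dict.get? y "ParentLink_RecID" = some v)
    (hpre : Pre1 (some v) l) :
    l.foldl pvStepA (y, acc) =
      match l.find? (fun x => PySem.Dict.get? (PySem.Dict.mk x) "RecId" == some v) with
      | some x => (pvRenameA y, acc ++ [(pvUnion (pvRenameA y) x).items])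
      | none => (y, acc) := by
  have hcont : PySem.Dict.contains y "ParentLink_RecID" = true := by
    rw [PySem.Dict.contains_eq_isSome_get?, hpl]; rfl
  induction l with
  | nil => simp
  | cons x t ih =>
    have hcons := pvPre1_cons hpre
    cases hx : PySem.Dict.get? (PySem.Dict.mk x) "RecId" with
    | none => rw [hx] at hcons; simp at hcons
    | some r =>
      by_cases hrv : r = v
      · subst hrv
        have hstep : pvStepA (y, acc) x =
            (pvRenameA y, acc ++ [(pvUnion (pvRenameA y) x).items]) := by
          simp [pvStepA, hcont, hpl, hx]
        rw [List.foldl_cons, hstep,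
          pvInner_skip t _ _ (pvRename_no_PL y hcont),
          List.find?_cons_of_pos (by simp [hx])]
      · have hvr : ¬(v = r) := fun hh => hrv hh.symm
        have hstep : pvStepA (y, acc) x = (y, acc) := by
          simp [pvStepA, hcont, hpl, hx, hvr]
        have hpre' : Pre1 (some v) t := by
          rcases hcons.2 with hh | hh
          · rw [hx] at hh
            simp only [Option.some.injEq] at hh
            exact absurd hh hrv
          · exact hh
        rw [List.foldl_cons, hstep, ih hpre',
          List.find?_cons_of_neg (by simp [hx, hrv])]

-- the outer loops agree, one param at a time
lemma pvOuter (reqs : List (List (String × String))) (ps : List (List (String × String))) :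
    ∀ (acc : List (List (String × String))),
      (∀ p ∈ ps, (PySem.Dict.get? (PySem.Dict.mk p) "ParentLink_RecID").isSome →
        Pre1 (PySem.Dict.get? (PySem.Dict.mk p) "ParentLink_RecID") reqs) →
      ps.foldl (fun acc y => (reqs.foldl pvStepA (PySem.Dict.mk y, acc)).2) acc =
      ps.foldl (fun acc y =>
        match PySem.Dict.get? (PySem.Dict.mk y) "ParentLink_RecID" with
        | some v =>
            match PySem.Dict.get? (reqs.foldl pvIndexStep PySem.Dict.empty) v with
            | some x => acc ++ [(pvUnion (pvRenameB (PySem.Dict.mk y)) x).items]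
            | none => acc
        | none => acc) acc := by
  induction ps with
  | nil => intro acc _; rfl
  | cons y t ih =>
    intro acc hp1
    simp only [List.foldl_cons]
    cases hy : PySem.Dict.get? (PySem.Dict.mk y) "ParentLink_RecID" with
    | none =>
      have hc : PySem.Dict.contains (PySem.Dict.mk y) "ParentLink_RecID" = false := by
        rw [PySem.Dict.contains_eq_isSome_get?, hy]; rfl
      rw [pvInner_skip reqs (PySem.Dict.mk y) acc hc]
      exact ih acc (fun p hp hs => hp1 p (List.mem_cons_of_mem _ hp) hs)
    | some v =>
      have hpre1 : Pre1 (some v) reqs := by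
        have hh := hp1 y (List.mem_cons_self) (by rw [hy]; rfl)
        rwa [hy] at hh
      rw [pvInner_eq reqs (PySem.Dict.mk y) acc v hy hpre1]
      dsimp only
      rw [pvIndex_get? reqs PySem.Dict.empty v, PySem.Dict.get?_empty, Option.none_or,
        ← pvRename_eq_B]
      cases hf : reqs.find? (fun x => PySem.Dict.get? (PySem.Dict.mk x) "RecId" == some v) with
      | none =>
        dsimp only
        exact ih acc (fun p hp hs => hp1 p (List.mem_cons_of_mem _ hp) hs)
      | some x =>
        dsimp only
        exact ih (acc ++ [(pvUnion (pvRenameA (PySem.Dict.mk y)) x).items])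
          (fun p hp hs => hp1 p (List.mem_cons_of_mem _ hp) hs)

-- ===== VERDICT =====
theorem combine_params_and_active_reqs_spec : Claim_equal_combine_params_and_active_reqs := by
  intro reqs params _ hpre
  unfold Spec_combine_params_and_active_reqs
  unfold Pre_combine_params_and_active_reqs at hpre
  unfold combine_params_and_active_reqs combine_params_and_active_reqs_alt
  exact pvOuter reqs params [] hpre
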